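-- pv_equiv track=rewrite | github.com/JIE77777/Wagstaff-Lab | core/sim/farming_planner.py | _largest_cluster_graph
-- ===== SOURCE A (Python) =====
-- from typing import Any, Dict, Iterable, List, Optional, Sequence, Tuple
--
-- def _largest_cluster_graph(layout: Sequence[str], graph: Sequence[Sequence[int]]) -> Dict[str, int]:
--     if not layout or not graph:
--         return {}
--     seen = [False] * len(layout)
--     best: Dict[str, int] = {}
--     for idx, pid in enumerate(layout):
--         if seen[idx] or not pid:
--             continue
--         stack = [idx]
--         seen[idx] = True
--         size = 0
--         while stack:
--             cur = stack.pop()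
--             size += 1
--             for nxt in graph[cur]:
--                 if not seen[nxt] and layout[nxt] == pid:
--                     seen[nxt] = True
--                     stack.append(nxt)
--         best[pid] = max(best.get(pid, 0), size)
--     return best
-- ===== SOURCE B (Python) =====
-- def _largest_cluster_graph(layout, graph):
--     if not layout or not graph:
--         return {}
--     n = len(layout)
--     seen = set()
--     best = {}
--     for idx, pid in enumerate(layout):
--         if not pid or idx in seen:
--             continue
--         # saturate: same-id closure of {idx} by repeated frontier expansion
--         reach = {idx}
--         for _ in range(n):
--             frontier = set()
--             for cur in reach:
--                 for nxt in graph[cur]: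
--                     if layout[nxt] == pid and nxt not in reach:
--                         frontier.add(nxt)
--             if not frontier:
--                 break
--             reach |= frontier
--         size = len(reach - seen)
--         seen |= reach
--         best[pid] = max(best.get(pid, 0), size)
--     return best
-- ===== Notes on version B (the rewrite author's own statement) =====
-- stated objective: alternative
-- what changed: Replaces the explicit-stack DFS flood fill (global boolean seen array, pop/push worklist) by round-based frontier saturation over Python sets: each cluster is the fixed point of repeatedly adding all same-id neighbours of the current reach set, and the cluster size is the cardinality of reach minus the already-seen set.
-- outside the precondition, e.g. on _largest_cluster_graph(['c1'], [[-1]]): A returns {'c1': 1}, B returns {'c1': 2}; on _largest_cluster_graph(['a', 'a'], [[1, -1], [], [0]]): A returns {'a': 2}, B returns {'a': 3}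
import Mathlib
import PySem

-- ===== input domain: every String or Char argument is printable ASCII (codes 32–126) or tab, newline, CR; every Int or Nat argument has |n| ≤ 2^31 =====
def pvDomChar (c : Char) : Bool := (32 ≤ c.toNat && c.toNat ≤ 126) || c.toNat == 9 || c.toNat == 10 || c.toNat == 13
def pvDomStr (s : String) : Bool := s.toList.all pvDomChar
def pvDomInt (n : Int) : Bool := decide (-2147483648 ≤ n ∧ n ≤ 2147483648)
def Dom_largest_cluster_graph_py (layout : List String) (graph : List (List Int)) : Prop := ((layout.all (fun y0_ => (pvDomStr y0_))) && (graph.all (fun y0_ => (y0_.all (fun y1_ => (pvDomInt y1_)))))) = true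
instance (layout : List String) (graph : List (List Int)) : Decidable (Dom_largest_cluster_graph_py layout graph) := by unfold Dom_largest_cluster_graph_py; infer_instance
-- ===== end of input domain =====

-- ===== PORT A =====
-- B replaces A's explicit-stack DFS flood fill by round-based frontier saturation over sets
-- (objective: alternative; equal return values on Pre_).

-- inner 'for nxt in graph[cur]' loop of A (short-circuit 'not seen[nxt] and layout[nxt] == pid';
-- when seen[nxt] is in range, layout[nxt] is too, so evaluating the second lookup in the same
-- match is exact)
def pvA_push (layout : List String) (pid : String) : List Int → List Int × List Bool → Option (List Int × List Bool)
  | [], st => some st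
  | nxt :: rest, (stack, seen) =>
    match PySem.List.pyGet? seen nxt with
    | none => none           -- IndexError: seen[nxt]
    | some sv =>
      if sv then pvA_push layout pid rest (stack, seen)
      else
        match PySem.List.pyGet? layout nxt with
        | none => none       -- IndexError: layout[nxt]
        | some lv =>
          if lv == pid then
            pvA_push layout pid rest (stack ++ [nxt], PySem.List.pySetD seen nxt true)
          else pvA_push layout pid rest (stack, seen)

-- 'while stack:' loop of A; fuel only makes the recursion structural (one unit per iteration,
-- n + 1 units suffice under Pre_)
def pvA_loop (layout : List String) (graph : List (List Int)) (pid : String) :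
    Nat → List Int → List Bool → Int → Option (List Bool × Int)
  | 0, _, _, _ => none
  | fuel + 1, stack, seen, size =>
    match PySem.List.pop? stack (-1) with
    | none => some (seen, size)          -- stack empty: while-loop exits
    | some (cur, stack') =>
      match PySem.List.pyGet? graph cur with
      | none => none                     -- IndexError: graph[cur]
      | some row =>
        match pvA_push layout pid row (stack', seen) with
        | none => none
        | some (stack'', seen') => pvA_loop layout graph pid fuel stack'' seen' (size + 1)

-- 'for idx, pid in enumerate(layout):' loop of A
def pvA_main (layout : List String) (graph : List (List Int)) :
    List (Int × String) → List Bool → PySem.Dict String Int → Option (PySem.Dict String Int)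
  | [], _, best => some best
  | (idx, pid) :: rest, seen, best =>
    match PySem.List.pyGet? seen idx with
    | none => none
    | some sv =>
      if sv || pid == "" then pvA_main layout graph rest seen best
      else
        match pvA_loop layout graph pid (layout.length + 1) [idx] (PySem.List.pySetD seen idx true) 0 with
        | none => none
        | some (seen', size) =>
          pvA_main layout graph rest seen'
            (PySem.Dict.insert best pid (max (PySem.Dict.getD best pid 0) size))

def largest_cluster_graph_py (layout : List String) (graph : List (List Int)) : List (String × Int) :=
  if layout.isEmpty || graph.isEmpty then []
  else
    match pvA_main layout graph (PySem.List.enumerate layout)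
        (List.replicate layout.length false) PySem.Dict.empty with
    | none => []        -- Python raises here; excluded by Pre_
    | some best => best.items

-- ===== PORT B =====
-- inner 'for nxt in graph[cur]' loop of B (short-circuit 'layout[nxt] == pid and nxt not in reach')
def pvB_row (layout : List String) (pid : String) (reach : PySem.Set Int) :
    List Int → PySem.Set Int → Option (PySem.Set Int)
  | [], frontier => some frontier
  | nxt :: rest, frontier =>
    match PySem.List.pyGet? layout nxt with
    | none => none           -- IndexError: layout[nxt]
    | some lv =>
      if lv == pid && !(PySem.Set.contains reach nxt) then
        pvB_row layout pid reach rest (PySem.Set.add frontier nxt)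
      else pvB_row layout pid reach rest frontier

-- 'for cur in reach:' loop of B (frontier is a set; only its extent is consumed downstream)
def pvB_frontier (layout : List String) (graph : List (List Int)) (pid : String)
    (reach : PySem.Set Int) : List Int → PySem.Set Int → Option (PySem.Set Int)
  | [], frontier => some frontier
  | cur :: rest, frontier =>
    match PySem.List.pyGet? graph cur with
    | none => none           -- IndexError: graph[cur]
    | some row =>
      match pvB_row layout pid reach row frontier with
      | none => none
      | some frontier' => pvB_frontier layout graph pid reach rest frontier'

-- 'for _ in range(n): … if not frontier: break' saturation loop of B
def pvB_sat (layout : List String) (graph : List (List Int)) (pid : String) :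
    Nat → PySem.Set Int → Option (PySem.Set Int)
  | 0, reach => some reach
  | k + 1, reach =>
    match pvB_frontier layout graph pid reach reach PySem.Set.empty with
    | none => none
    | some frontier =>
      if frontier.isEmpty then some reach
      else pvB_sat layout graph pid k (PySem.Set.union reach frontier)

-- 'for idx, pid in enumerate(layout):' loop of B
def pvB_main (layout : List String) (graph : List (List Int)) :
    List (Int × String) → PySem.Set Int → PySem.Dict String Int → Option (PySem.Dict String Int)
  | [], _, best => some best
  | (idx, pid) :: rest, seen, best =>
    if pid == "" || PySem.Set.contains seen idx then pvB_main layout graph rest seen best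
    else
      match pvB_sat layout graph pid layout.length (PySem.Set.add PySem.Set.empty idx) with
      | none => none
      | some reach =>
        pvB_main layout graph rest (PySem.Set.union seen reach)
          (PySem.Dict.insert best pid
            (max (PySem.Dict.getD best pid 0) ((PySem.Set.diff reach seen).length : Int)))

def largest_cluster_graph_py_alt (layout : List String) (graph : List (List Int)) : List (String × Int) :=
  if layout.isEmpty || graph.isEmpty then []
  else
    match pvB_main layout graph (PySem.List.enumerate layout) PySem.Set.empty PySem.Dict.empty with
    | none => []
    | some best => best.items

-- ===== PRECONDITION & SPEC =====
-- Pre_ excludes neighbour indices outside [0, len(layout)): indices ≥ len(layout) make A raise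
-- IndexError, and negative indices hit Python's list-index wraparound, under which the same node
-- is visible under two raw names (j and j+n) — A's seen array aliases them while each raw name
-- selects its own graph row (indexed modulo len(graph), which may differ from len(layout)), so
-- A's own answer there is an accident of traversal order and no value is specifiable.
def Pre_largest_cluster_graph_py (layout : List String) (graph : List (List Int)) : Prop :=
  layout = [] ∨ graph = [] ∨
    ∀ i < layout.length, layout.getD i "" ≠ "" →
      i < graph.length ∧ ∀ j ∈ graph.getD i [], 0 ≤ j ∧ j < (layout.length : Int)
instance (layout : List String) (graph : List (List Int)) : Decidable (Pre_largest_cluster_graph_py layout graph) := by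
  unfold Pre_largest_cluster_graph_py; infer_instance

def pvWitness_largest_cluster_graph_py : List String × List (List Int) :=
  (["a", "a", "b", ""], [[1], [0, 2], [2], [0]])

def Spec_largest_cluster_graph_py (layout : List String) (graph : List (List Int)) (out : List (String × Int)) : Prop := out = largest_cluster_graph_py_alt layout graph
instance (layout : List String) (graph : List (List Int)) (out : List (String × Int)) : Decidable (Spec_largest_cluster_graph_py layout graph out) := by unfold Spec_largest_cluster_graph_py; infer_instance

-- ===== CLAIM (what is proved, stated in full; the proofs are below) =====
def Claim_equal_largest_cluster_graph_py : Prop := ∀ (layout : List String) (graph : List (List Int)), Dom_largest_cluster_graph_py layout graph → Pre_largest_cluster_graph_py layout graph → Spec_largest_cluster_graph_py layout graph (largest_cluster_graph_py layout graph)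

-- ===== LEMMAS AND PROOFS =====

-- abbreviations used by the proofs (node j is the Int appearing in the lists; valid = in range)
def pvValid (n : Nat) (j : Int) : Prop := 0 ≤ j ∧ j < (n : Int)

def pvPid (layout : List String) (j : Int) : String := layout.getD j.toNat ""

def pvRow (graph : List (List Int)) (j : Int) : List Int := graph.getD j.toNat []

def pvSeenAt (s : List Bool) (j : Int) : Bool := s.getD j.toNat false

-- the third disjunct of Pre_: every non-empty-id node has a row whose entries are in range
def pvGood (layout : List String) (graph : List (List Int)) : Prop :=
  ∀ i < layout.length, layout.getD i "" ≠ "" →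
    i < graph.length ∧ ∀ j ∈ graph.getD i [], 0 ≤ j ∧ j < (layout.length : Int)

-- a list of nodes is closed under same-id edges
def pvClosed (layout : List String) (graph : List (List Int)) (pid : String) (R : List Int) : Prop :=
  ∀ u ∈ R, ∀ v ∈ pvRow graph u, pvPid layout v = pid → v ∈ R

-- a boolean seen-array is closed under same-id edges (the between-phases invariant of A)
def pvSeenClosed (layout : List String) (graph : List (List Int)) (s : List Bool) : Prop :=
  ∀ i < s.length, s.getD i false = true →
    layout.getD i "" ≠ "" ∧
      ∀ v ∈ pvRow graph (i : Int), pvPid layout v = layout.getD i "" → pvSeenAt s v = true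

theorem pv_pyGet_valid {α : Type} (xs : List α) (d : α) (j : Int)
    (h0 : 0 ≤ j) (h1 : j < (xs.length : Int)) :
    PySem.List.pyGet? xs j = some (xs.getD j.toNat d) := by
  have hlt : j.toNat < xs.length := by omega
  have h := PySem.List.pyGet?_of_nonneg xs h0
  rw [h]
  simp [List.getD_eq_getElem?_getD, List.getElem?_eq_getElem hlt]

-- every node of a row at a good non-empty-id node is valid
theorem pv_good_row {layout : List String} {graph : List (List Int)}
    (hg : pvGood layout graph) {u : Int} (hu : pvValid layout.length u)
    (hpid : pvPid layout u ≠ "") :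
    u.toNat < graph.length ∧ ∀ j ∈ pvRow graph u, pvValid layout.length j := by
  obtain ⟨hu0, hu1⟩ := hu
  have := hg u.toNat (by omega) hpid
  exact ⟨this.1, fun j hj => this.2 j hj⟩

theorem pv_row_get {graph : List (List Int)} {u : Int} (h0 : 0 ≤ u)
    (h : u.toNat < graph.length) :
    PySem.List.pyGet? graph u = some (pvRow graph u) :=
  pv_pyGet_valid graph [] u h0 (by omega)

theorem pvB_row_some (layout : List String) (pid : String) (reach f : PySem.Set Int)
    (row : List Int) (hrow : ∀ j ∈ row, pvValid layout.length j) (hf : f.Nodup) :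
    ∃ f', pvB_row layout pid reach row f = some f' ∧ f'.Nodup ∧
      (∀ j, j ∈ f' ↔ j ∈ f ∨ (j ∈ row ∧ pvPid layout j = pid ∧ j ∉ reach)) := by
  induction row generalizing f with
  | nil => exact ⟨f, rfl, hf, by simp⟩
  | cons nxt rest ih =>
    have hv : pvValid layout.length nxt := hrow nxt (by simp)
    have hget : PySem.List.pyGet? layout nxt = some (pvPid layout nxt) :=
      pv_pyGet_valid layout "" nxt hv.1 hv.2
    by_cases hc : pvPid layout nxt = pid ∧ nxt ∉ reach
    · obtain ⟨f', h1, h2, h3⟩ := ih (PySem.Set.add f nxt)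
        (fun j hj => hrow j (by simp [hj])) (PySem.Set.nodup_add f nxt hf)
      refine ⟨f', ?_, h2, fun j => ?_⟩
      · simp only [pvB_row, hget]
        have : (pvPid layout nxt == pid && !PySem.Set.contains reach nxt) = true := by
          simp [hc.1, hc.2]
        rw [this]; simpa using h1
      · rw [h3 j, PySem.Set.mem_add]
        constructor
        · rintro ((h | h) | h)
          · exact Or.inl h
          · exact Or.inr ⟨by simp [h], h ▸ hc.1, h ▸ hc.2⟩
          · exact Or.inr ⟨by simp [h.1], h.2.1, h.2.2⟩
        · rintro (h | ⟨hm, hp, hr⟩)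
          · exact Or.inl (Or.inl h)
          · rcases List.mem_cons.mp hm with h | h
            · exact Or.inl (Or.inr h)
            · exact Or.inr ⟨h, hp, hr⟩
    · obtain ⟨f', h1, h2, h3⟩ := ih f (fun j hj => hrow j (by simp [hj])) hf
      refine ⟨f', ?_, h2, fun j => ?_⟩
      · simp only [pvB_row, hget]
        have : (pvPid layout nxt == pid && !PySem.Set.contains reach nxt) = false := by
          rcases not_and_or.mp hc with h | h
          · simp [h]
          · simp [not_not.mp h]
        rw [this]; simpa using h1
      · rw [h3 j]
        constructor
        · rintro (h | h)
          · exact Or.inl h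
          · exact Or.inr ⟨by simp [h.1], h.2.1, h.2.2⟩
        · rintro (h | ⟨hm, hp, hr⟩)
          · exact Or.inl h
          · rcases List.mem_cons.mp hm with h | h
            · exact absurd ⟨h ▸ hp, h ▸ hr⟩ hc
            · exact Or.inr ⟨h, hp, hr⟩

theorem pvB_frontier_some (layout : List String) (graph : List (List Int)) (pid : String)
    (hg : pvGood layout graph) (reach : PySem.Set Int) (curs : List Int) (f : PySem.Set Int)
    (hcurs : ∀ u ∈ curs, pvValid layout.length u ∧ pvPid layout u = pid) (hpid : pid ≠ "")
    (hf : f.Nodup) :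
    ∃ f', pvB_frontier layout graph pid reach curs f = some f' ∧ f'.Nodup ∧
      (∀ j, j ∈ f' ↔ j ∈ f ∨ ∃ u ∈ curs, j ∈ pvRow graph u ∧ pvPid layout j = pid ∧ j ∉ reach) := by
  induction curs generalizing f with
  | nil => exact ⟨f, rfl, hf, by simp⟩
  | cons cur rest ih =>
    obtain ⟨hv, hp⟩ := hcurs cur (by simp)
    obtain ⟨hlt, hrow⟩ := pv_good_row hg hv (hp ▸ hpid)
    obtain ⟨f1, h1, hn1, hm1⟩ := pvB_row_some layout pid reach f (pvRow graph cur) hrow hf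
    obtain ⟨f', h2, hn2, hm2⟩ := ih f1 (fun u hu => hcurs u (by simp [hu])) hn1
    refine ⟨f', ?_, hn2, fun j => ?_⟩
    · simp only [pvB_frontier, pv_row_get hv.1 hlt, h1]; exact h2
    · rw [hm2 j]
      constructor
      · rintro (h | ⟨u, hu, h⟩)
        · rcases (hm1 j).mp h with h | h
          · exact Or.inl h
          · exact Or.inr ⟨cur, by simp, h⟩
        · exact Or.inr ⟨u, by simp [hu], h⟩
      · rintro (h | ⟨u, hu, h⟩)
        · exact Or.inl ((hm1 j).mpr (Or.inl h))
        · rcases List.mem_cons.mp hu with rfl | hu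
          · exact Or.inl ((hm1 j).mpr (Or.inr h))
          · exact Or.inr ⟨u, hu, h⟩

-- a nodup list of valid nodes has at most n elements
theorem pv_len_le {n : Nat} {R : List Int} (hnd : R.Nodup)
    (hv : ∀ j ∈ R, pvValid n j) : R.length ≤ n := by
  classical
  have hinj : ∀ x ∈ R, ∀ y ∈ R, x.toNat = y.toNat → x = y := by
    intro x hx y hy hxy
    have h1 := (hv x hx).1; have h2 := (hv y hy).1
    omega
  have hnd' : (R.map Int.toNat).Nodup := List.Nodup.map_on hinj hnd
  have hsub : (R.map Int.toNat).toFinset ⊆ Finset.range n := by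
    intro i hi
    simp only [List.mem_toFinset, List.mem_map] at hi
    obtain ⟨j, hj, rfl⟩ := hi
    obtain ⟨h1, h2⟩ := hv j hj
    simp only [Finset.mem_range]
    omega
  calc R.length = (R.map Int.toNat).length := by simp
    _ = (R.map Int.toNat).toFinset.card := (List.toFinset_card_of_nodup hnd').symm
    _ ≤ (Finset.range n).card := Finset.card_le_card hsub
    _ = n := Finset.card_range n

theorem pvB_sat_some (layout : List String) (graph : List (List Int)) (pid : String)
    (hg : pvGood layout graph) (hpid : pid ≠ "") :
    ∀ (k : Nat) (reach : PySem.Set Int), reach.Nodup →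
      (∀ j ∈ reach, pvValid layout.length j ∧ pvPid layout j = pid) →
      layout.length + 1 ≤ k + reach.length →
      ∃ R, pvB_sat layout graph pid k reach = some R ∧ R.Nodup ∧
        (∀ j ∈ reach, j ∈ R) ∧
        (∀ j ∈ R, pvValid layout.length j ∧ pvPid layout j = pid) ∧
        pvClosed layout graph pid R ∧
        (∀ S : Int → Prop, (∀ j ∈ reach, S j) →
          (∀ u, S u → ∀ v ∈ pvRow graph u, pvPid layout v = pid → S v) →
          ∀ j ∈ R, S j) := by
  intro k
  induction k with
  | zero =>
    intro reach hnd hval hlen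
    have := pv_len_le hnd (fun j hj => (hval j hj).1)
    omega
  | succ k ih =>
    intro reach hnd hval hlen
    obtain ⟨f, hf, hfnd, hfm⟩ := pvB_frontier_some layout graph pid hg reach reach
      PySem.Set.empty hval hpid List.nodup_nil
    have hf' : pvB_frontier layout graph pid reach reach [] = some f := hf
    have hfm' : ∀ j, j ∈ f ↔ ∃ u ∈ reach, j ∈ pvRow graph u ∧ pvPid layout j = pid ∧ j ∉ reach := by
      intro j; rw [hfm j]; simp [PySem.Set.empty]
    by_cases hemp : f = []
    · refine ⟨reach, ?_, hnd, fun j hj => hj, hval, ?_, fun S hS _ j hj => hS j hj⟩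
      · simp [pvB_sat, hf', hemp]
      · intro u hu v hv hvp
        by_contra hvr
        have : v ∈ f := (hfm' v).mpr ⟨u, hu, hv, hvp, hvr⟩
        simp [hemp] at this
    · have hnew : ∀ j ∈ f, j ∉ reach := fun j hj => ((hfm' j).mp hj).choose_spec.2.2.2
      have hval' : ∀ j ∈ f, pvValid layout.length j ∧ pvPid layout j = pid := by
        intro j hj
        obtain ⟨u, hu, hrow, hp, _⟩ := (hfm' j).mp hj
        obtain ⟨huv, hup⟩ := hval u hu
        exact ⟨(pv_good_row hg huv (hup ▸ hpid)).2 j hrow, hp⟩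
      have hunion : PySem.Set.union reach f = reach ++ f := by
        have h := @PySem.Set.update_eq_append_of_disjoint Int _ _ reach f hfnd hnew
        exact h
      have hndU : (PySem.Set.union reach f).Nodup := by
        rw [hunion]
        exact List.Nodup.append hnd hfnd (fun a ha hb => hnew a hb ha)
      have hvalU : ∀ j ∈ PySem.Set.union reach f,
          pvValid layout.length j ∧ pvPid layout j = pid := by
        intro j hj
        rcases (PySem.Set.mem_union reach f j).mp hj with h | h
        · exact hval j h
        · exact hval' j h
      have hlenU : layout.length + 1 ≤ k + (PySem.Set.union reach f).length := by
        rw [hunion, List.length_append]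
        have : 1 ≤ f.length := by
          cases f with
          | nil => exact absurd rfl hemp
          | cons a t => simp
        omega
      obtain ⟨R, hR, hRnd, hRsub, hRval, hRcl, hRmin⟩ :=
        ih (PySem.Set.union reach f) hndU hvalU hlenU
      refine ⟨R, ?_, hRnd, ?_, hRval, hRcl, ?_⟩
      · have hne : f.isEmpty = false := by
          cases f with
          | nil => exact absurd rfl hemp
          | cons a t => rfl
        simp [pvB_sat, hf', hne, hR]
      · intro j hj
        exact hRsub j ((PySem.Set.mem_union reach f j).mpr (Or.inl hj))
      · intro S hS hcl j hj
        refine hRmin S ?_ hcl j hj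
        intro x hx
        rcases (PySem.Set.mem_union reach f x).mp hx with h | h
        · exact hS x h
        · obtain ⟨u, hu, hrow, hp, _⟩ := (hfm' x).mp h
          exact hcl u (hS u hu) x hrow hp

-- number of nodes marked in s beyond those marked in base
def pvNew (base s : List Bool) : Nat :=
  ((Finset.range base.length).filter
    (fun i => s.getD i false = true ∧ base.getD i false = false)).card

theorem pvNew_le (base s : List Bool) : pvNew base s ≤ base.length := by
  calc pvNew base s ≤ (Finset.range base.length).card := Finset.card_filter_le _ _
    _ = base.length := Finset.card_range _

theorem pvNew_self (base : List Bool) : pvNew base base = 0 := by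
  unfold pvNew
  rw [Finset.card_eq_zero, Finset.filter_eq_empty_iff]
  intro i _
  simp only [List.getD_eq_getElem?_getD, not_and]
  intro h
  simp [h]

theorem pv_seenAt_set {s : List Bool} {j : Int} (hv0 : 0 ≤ j)
    (hvl : j.toNat < s.length) (x : Int) :
    pvSeenAt (PySem.List.pySetD s j true) x =
      (if x.toNat = j.toNat then true else pvSeenAt s x) := by
  have hset := PySem.List.pySetD_of_nonneg s (i := j) (v := true) hv0
  rw [hset]
  unfold pvSeenAt
  by_cases hxj : x.toNat = j.toNat
  · rw [hxj]
    simp [List.getD_eq_getElem?_getD, List.getElem?_set_self hvl]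
  · have hne : j.toNat ≠ x.toNat := fun h => hxj h.symm
    simp [List.getD_eq_getElem?_getD, List.getElem?_set_ne hne, hxj]

theorem pv_setD_length {s : List Bool} {j : Int} (hv0 : 0 ≤ j) :
    (PySem.List.pySetD s j true).length = s.length := by
  rw [PySem.List.pySetD_of_nonneg s (i := j) (v := true) hv0]
  simp

theorem pvNew_mark (base s : List Bool) (hsl : s.length = base.length) (j : Int)
    (hv : pvValid base.length j) (hs : pvSeenAt s j = false)
    (hb : pvSeenAt base j = false) :
    pvNew base (PySem.List.pySetD s j true) = pvNew base s + 1 := by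
  obtain ⟨hv0, hv1⟩ := hv
  have hvl : j.toNat < s.length := by omega
  have hset : ∀ i : Nat, (PySem.List.pySetD s j true).getD i false =
      (if i = j.toNat then true else s.getD i false) := by
    intro i
    have h := pv_seenAt_set hv0 hvl (x := (i : Int))
    unfold pvSeenAt at h
    simpa using h
  unfold pvNew
  unfold pvSeenAt at hs hb
  have hmain : (Finset.range base.length).filter
        (fun i => (PySem.List.pySetD s j true).getD i false = true ∧ base.getD i false = false)
      = insert j.toNat ((Finset.range base.length).filter
        (fun i => s.getD i false = true ∧ base.getD i false = false)) := by
    ext i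
    simp only [Finset.mem_insert, Finset.mem_filter, Finset.mem_range, hset i]
    by_cases hij : i = j.toNat
    · subst hij
      have hlt : j.toNat < base.length := by omega
      rw [List.getD_eq_getElem _ _ hlt] at hb
      simp [hb, hlt]
    · simp [hij]
  rw [hmain, Finset.card_insert_of_notMem]
  intro hmem
  rw [Finset.mem_filter] at hmem
  rw [hs] at hmem
  exact absurd hmem.2.1 (by simp)

theorem pv_seenAt_get {s : List Bool} {n : Nat} (hsl : s.length = n) {j : Int}
    (hv : pvValid n j) :
    PySem.List.pyGet? s j = some (pvSeenAt s j) := by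
  obtain ⟨h1, h2⟩ := hv
  exact pv_pyGet_valid s false j h1 (by omega)

-- A's inner neighbour loop: appends the fresh eligible nodes to the stack and marks them
theorem pvA_push_some (layout : List String) (pid : String)
    (base : List Bool) (hbl : base.length = layout.length) :
    ∀ (row : List Int), (∀ j ∈ row, pvValid layout.length j) →
    ∀ (stack : List Int) (seenC : List Bool), seenC.length = layout.length →
    (∀ j, pvValid layout.length j → pvSeenAt base j = true → pvSeenAt seenC j = true) →
    ∃ stack2 seen2 new, pvA_push layout pid row (stack, seenC) = some (stack2, seen2) ∧
      stack2 = stack ++ new ∧ new.Nodup ∧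
      seen2.length = layout.length ∧
      (∀ j ∈ new, j ∈ row ∧ pvPid layout j = pid ∧ pvSeenAt seenC j = false ∧
        pvValid layout.length j) ∧
      (∀ j, pvValid layout.length j →
        (pvSeenAt seen2 j = true ↔ pvSeenAt seenC j = true ∨ j ∈ new)) ∧
      (∀ v ∈ row, pvPid layout v = pid → pvSeenAt seen2 v = true) ∧
      pvNew base seen2 = pvNew base seenC + new.length := by
  intro row
  induction row with
  | nil =>
    intro _ stack seenC hsl _
    exact ⟨stack, seenC, [], rfl, by simp, List.nodup_nil, hsl,
      by simp, by simp, by simp, by simp⟩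
  | cons nxt rest ih =>
    intro hrow stack seenC hsl hmono
    have hv : pvValid layout.length nxt := hrow nxt (by simp)
    have hgets : PySem.List.pyGet? seenC nxt = some (pvSeenAt seenC nxt) :=
      pv_seenAt_get hsl hv
    have hgetl : PySem.List.pyGet? layout nxt = some (pvPid layout nxt) :=
      pv_pyGet_valid layout "" nxt hv.1 hv.2
    have hrest : ∀ j ∈ rest, pvValid layout.length j := fun j hj => hrow j (by simp [hj])
    by_cases hseen : pvSeenAt seenC nxt = true
    · obtain ⟨stack2, seen2, new, h1, h2, h3, h4, h5, h6, h7, h8⟩ :=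
        ih hrest stack seenC hsl hmono
      refine ⟨stack2, seen2, new,
        ?_, h2, h3, h4,
        fun j hj => ⟨List.mem_cons_of_mem _ (h5 j hj).1, (h5 j hj).2⟩, h6, ?_, h8⟩
      · simp only [pvA_push, hgets, hseen]
        simpa using h1
      · intro v hvm hvp
        rcases List.mem_cons.mp hvm with rfl | hvm
        · exact ((h6 v hv).mpr (Or.inl hseen))
        · exact h7 v hvm hvp
    · have hseenF : pvSeenAt seenC nxt = false := by
        cases h : pvSeenAt seenC nxt
        · rfl
        · exact absurd h hseen
      by_cases hp : pvPid layout nxt = pid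
      · -- fresh eligible node: mark it and push it
        have hsl' : (PySem.List.pySetD seenC nxt true).length = layout.length := by
          rw [pv_setD_length hv.1, hsl]
        have hvl : nxt.toNat < seenC.length := by
          obtain ⟨a, b⟩ := hv; omega
        have htoNat : ∀ x : Int, pvValid layout.length x →
            (x.toNat = nxt.toNat ↔ x = nxt) := by
          intro x hx
          obtain ⟨a, b⟩ := hx
          obtain ⟨c, d⟩ := hv
          omega
        have hsetAt : ∀ x : Int,
            pvSeenAt (PySem.List.pySetD seenC nxt true) x =
              (if x.toNat = nxt.toNat then true else pvSeenAt seenC x) :=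
          fun x => pv_seenAt_set hv.1 hvl x
        have hmono' : ∀ j, pvValid layout.length j → pvSeenAt base j = true →
            pvSeenAt (PySem.List.pySetD seenC nxt true) j = true := by
          intro j hj hb
          rw [hsetAt j]
          by_cases hjn : j.toNat = nxt.toNat
          · simp [hjn]
          · simp [hjn, hmono j hj hb]
        obtain ⟨stack2, seen2, new, h1, h2, h3, h4, h5, h6, h7, h8⟩ :=
          ih hrest (stack ++ [nxt]) (PySem.List.pySetD seenC nxt true) hsl' hmono'
        have hnotnew : nxt ∉ new := by
          intro hmem
          have := (h5 nxt hmem).2.2.1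
          rw [hsetAt nxt] at this
          simp at this
        refine ⟨stack2, seen2, nxt :: new, ?_, ?_, ?_, h4, ?_, ?_, ?_, ?_⟩
        · simp only [pvA_push, hgets, hseenF, hgetl]
          have hbq : (pvPid layout nxt == pid) = true := by simp [hp]
          rw [hbq]
          simpa using h1
        · rw [h2]; simp
        · exact List.nodup_cons.mpr ⟨hnotnew, h3⟩
        · intro j hj
          rcases List.mem_cons.mp hj with rfl | hj
          · exact ⟨by simp, hp, hseenF, hv⟩
          · obtain ⟨hj1, hj2, hj3, hj4⟩ := h5 j hj
            refine ⟨by simp [hj1], hj2, ?_, hj4⟩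
            rw [hsetAt j] at hj3
            by_cases hjn : j.toNat = nxt.toNat
            · simp [hjn] at hj3
            · simpa [hjn] using hj3
        · intro j hj
          rw [h6 j hj, hsetAt j]
          rw [List.mem_cons]
          by_cases hjn : j.toNat = nxt.toNat
          · rw [htoNat j hj] at hjn
            simp [hjn]
          · have : ¬ (j = nxt) := fun h => hjn (by rw [h])
            simp [hjn, this]
        · intro v hvm hvp
          rcases List.mem_cons.mp hvm with rfl | hvm
          · apply (h6 v hv).mpr
            left
            rw [hsetAt v]
            simp
          · exact h7 v hvm hvp
        · have hbn : pvSeenAt base nxt = false := by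
            cases hb : pvSeenAt base nxt
            · rfl
            · exact absurd (hmono nxt hv hb) (by simp [hseenF])
          rw [h8, pvNew_mark base seenC (by omega) nxt (by rw [hbl]; exact hv) hseenF hbn]
          simp only [List.length_cons]
          omega
      · -- wrong id: skip
        obtain ⟨stack2, seen2, new, h1, h2, h3, h4, h5, h6, h7, h8⟩ :=
          ih hrest stack seenC hsl hmono
        refine ⟨stack2, seen2, new,
          ?_, h2, h3, h4,
          fun j hj => ⟨List.mem_cons_of_mem _ (h5 j hj).1, (h5 j hj).2⟩, h6, ?_, h8⟩
        · simp only [pvA_push, hgets, hseenF, hgetl]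
          have hbq : (pvPid layout nxt == pid) = false := by simp [hp]
          rw [hbq]
          simpa using h1
        · intro v hvm hvp
          rcases List.mem_cons.mp hvm with rfl | hvm
          · exact absurd hvp hp
          · exact h7 v hvm hvp

-- A's while-loop: starting from a stack of fresh marked R-nodes it marks exactly base ∪ R
-- and counts the fresh nodes
theorem pvA_loop_some (layout : List String) (graph : List (List Int)) (pid : String)
    (hg : pvGood layout graph) (hpid : pid ≠ "")
    (base : List Bool) (hbl : base.length = layout.length)
    (R : List Int) (hRval : ∀ j ∈ R, pvValid layout.length j ∧ pvPid layout j = pid)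
    (hRcl : pvClosed layout graph pid R) :
    ∀ (fuel : Nat) (stack : List Int) (seenC : List Bool) (size : Int),
      seenC.length = layout.length →
      (∀ j, pvValid layout.length j → pvSeenAt base j = true → pvSeenAt seenC j = true) →
      (∀ j, pvValid layout.length j → pvSeenAt seenC j = true →
        pvSeenAt base j = true ∨ j ∈ R) →
      (∀ j ∈ stack, pvValid layout.length j ∧ j ∈ R ∧ pvSeenAt seenC j = true ∧
        pvSeenAt base j = false) →
      stack.Nodup →
      (∀ j, pvValid layout.length j → pvSeenAt seenC j = true → pvSeenAt base j = false →
        j ∉ stack → ∀ v ∈ pvRow graph j, pvPid layout v = pid → pvSeenAt seenC v = true) →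
      size = (pvNew base seenC : Int) - stack.length →
      stack.length + (layout.length - pvNew base seenC) + 1 ≤ fuel →
      ∃ seenF sizeF, pvA_loop layout graph pid fuel stack seenC size = some (seenF, sizeF) ∧
        seenF.length = layout.length ∧
        (∀ j, pvValid layout.length j → pvSeenAt seenC j = true → pvSeenAt seenF j = true) ∧
        (∀ j, pvValid layout.length j → pvSeenAt seenF j = true →
          pvSeenAt base j = true ∨ j ∈ R) ∧
        (∀ j, pvValid layout.length j → pvSeenAt seenF j = true → pvSeenAt base j = false →
          ∀ v ∈ pvRow graph j, pvPid layout v = pid → pvSeenAt seenF v = true) ∧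
        sizeF = (pvNew base seenF : Int) := by
  intro fuel
  induction fuel with
  | zero =>
    intro stack seenC size _ _ _ _ _ _ _ hfuel
    omega
  | succ fuel ih =>
    intro stack seenC size hsl hmono hupper hstack hnd hexp hsize hfuel
    rcases List.eq_nil_or_concat' stack with rfl | ⟨ys, cur, rfl⟩
    · -- stack empty: the while-loop exits
      have hpop : PySem.List.pop? ([] : List Int) (-1) = none := by decide
      refine ⟨seenC, size, ?_, hsl, fun j _ h => h, hupper, ?_, ?_⟩
      · simp only [pvA_loop, hpop]
      · intro j hvj hsj hbj v hv hvp
        exact hexp j hvj hsj hbj (by simp) v hv hvp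
      · simpa using hsize
    · -- pop the last element cur
      obtain ⟨hvc, hcR, hcs, hcb⟩ := hstack cur (by simp)
      have hcp : pvPid layout cur = pid := (hRval cur hcR).2
      obtain ⟨hglt, hrowv⟩ := pv_good_row hg hvc (hcp ▸ hpid)
      have hget : PySem.List.pyGet? graph cur = some (pvRow graph cur) :=
        pv_row_get hvc.1 hglt
      have hndys : ys.Nodup := (List.nodup_append.mp hnd).1
      have hcur_ys : cur ∉ ys := by
        have hdis := List.disjoint_of_nodup_append hnd
        intro hmem
        exact hdis hmem (by simp)
      obtain ⟨stack2, seen2, new, h1, h2, h3, h4, h5, h6, h7, h8⟩ :=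
        pvA_push_some layout pid base hbl (pvRow graph cur) hrowv ys seenC hsl hmono
      have hm2 : ∀ j, pvValid layout.length j → pvSeenAt seenC j = true →
          pvSeenAt seen2 j = true := fun j hj h => (h6 j hj).mpr (Or.inl h)
      have hnewR : ∀ j ∈ new, j ∈ R := by
        intro j hj
        obtain ⟨hr, hpj, _, _⟩ := h5 j hj
        exact hRcl cur hcR j hr hpj
      have hnewb : ∀ j ∈ new, pvSeenAt base j = false := by
        intro j hj
        obtain ⟨_, _, hsc, hvj⟩ := h5 j hj
        cases hb : pvSeenAt base j
        · rfl
        · exact absurd (hmono j hvj hb) (by simp [hsc])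
      obtain ⟨seenF, sizeF, hres, c1, c2, c3, c4, c5⟩ := ih stack2 seen2 (size + 1)
        h4
        (fun j hj hb => hm2 j hj (hmono j hj hb))
        (by
          intro j hj hs
          rcases (h6 j hj).mp hs with h | h
          · exact hupper j hj h
          · exact Or.inr (hnewR j h))
        (by
          intro j hj
          rw [h2] at hj
          rcases List.mem_append.mp hj with h | h
          · obtain ⟨a, b, c, d⟩ := hstack j (by simp [h])
            exact ⟨a, b, hm2 j a c, d⟩
          · obtain ⟨_, _, hsc, hvj⟩ := h5 j h
            exact ⟨hvj, hnewR j h, (h6 j hvj).mpr (Or.inr h), hnewb j h⟩)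
        (by
          rw [h2]
          refine List.Nodup.append hndys h3 ?_
          intro a ha hb
          have h1' := (hstack a (by simp [ha])).2.2.1
          have h2' := (h5 a hb).2.2.1
          rw [h1'] at h2'
          exact Bool.noConfusion h2')
        (by
          intro j hj hsj hbj hjstack v hv hvp
          by_cases hjc : j = cur
          · subst hjc
            exact h7 v hv hvp
          · by_cases hjs : pvSeenAt seenC j = true
            · have hjR : j ∈ R := by
                rcases hupper j hj hjs with h | h
                · rw [h] at hbj; cases hbj
                · exact h
              have hjp : pvPid layout j = pid := (hRval j hjR).2
              have hnotys : j ∉ ys ++ [cur] := by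
                intro hmem
                rcases List.mem_append.mp hmem with h | h
                · exact hjstack (by rw [h2]; exact List.mem_append.mpr (Or.inl h))
                · simp at h; exact hjc h
              have := hexp j hj hjs hbj hnotys v hv hvp
              have hvv : pvValid layout.length v :=
                (pv_good_row hg hj (hjp ▸ hpid)).2 v hv
              exact hm2 v hvv this
            · have : j ∈ new := by
                rcases (h6 j hj).mp hsj with h | h
                · exact absurd h hjs
                · exact h
              exact absurd (by rw [h2]; exact List.mem_append.mpr (Or.inr this)) hjstack)
        (by
          rw [h8, h2]
          simp only [List.length_append]
          have : (ys ++ [cur]).length = ys.length + 1 := by simp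
          rw [this] at hsize
          push_cast
          push_cast at hsize
          omega)
        (by
          have hle : pvNew base seen2 ≤ layout.length := by
            have := pvNew_le base seen2
            omega
          have hlen2 : stack2.length = ys.length + new.length := by
            rw [h2]; simp
          have hlen1 : (ys ++ [cur]).length = ys.length + 1 := by simp
          rw [hlen1] at hfuel
          rw [hlen2, h8]
          omega)
      refine ⟨seenF, sizeF, ?_, c1, ?_, c3, c4, c5⟩
      · simp only [pvA_loop, PySem.List.pop?_last, hget, h1]
        exact hres
      · intro j hj h
        exact c2 j hj (hm2 j hj h)

-- the fresh count of A's phase equals the size len(reach - seen) computed by B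
theorem pv_count (layout : List String) (base : List Bool) (hbl : base.length = layout.length)
    (seenF : List Bool) (R seenB : List Int) (hRnd : R.Nodup)
    (hRval : ∀ j ∈ R, pvValid layout.length j)
    (hcorr : ∀ j, pvValid layout.length j → (pvSeenAt base j = true ↔ j ∈ seenB))
    (hchar : ∀ j, pvValid layout.length j →
      (pvSeenAt seenF j = true ↔ pvSeenAt base j = true ∨ j ∈ R)) :
    pvNew base seenF = (PySem.Set.diff R seenB).length := by
  classical
  have hdiff : PySem.Set.diff R seenB = R.filter (fun j => !(PySem.Set.contains seenB j)) := rfl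
  set D := R.filter (fun j => !(PySem.Set.contains seenB j)) with hD
  have hDR : ∀ j ∈ D, j ∈ R := fun j hj => (List.mem_filter.mp hj).1
  have hDnd : D.Nodup := List.Nodup.filter _ hRnd
  have hDNnd : (D.map Int.toNat).Nodup := by
    refine List.Nodup.map_on ?_ hDnd
    intro x hx y hy hxy
    have h1 := (hRval x (hDR x hx)).1
    have h2 := (hRval y (hDR y hy)).1
    omega
  have hsetEq : (D.map Int.toNat).toFinset =
      (Finset.range base.length).filter
        (fun i => seenF.getD i false = true ∧ base.getD i false = false) := by
    ext i
    simp only [List.mem_toFinset, List.mem_map, Finset.mem_filter, Finset.mem_range]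
    constructor
    · rintro ⟨j, hj, rfl⟩
      have hjR := hDR j hj
      obtain ⟨hj0, hj1⟩ := hRval j hjR
      have hnc := (List.mem_filter.mp hj).2
      have hnmem : j ∉ seenB := by
        intro hmem
        rw [(PySem.Set.contains_iff seenB j).mpr hmem] at hnc
        exact Bool.noConfusion hnc
      have hbf : pvSeenAt base j = false := by
        cases hb : pvSeenAt base j
        · rfl
        · exact absurd ((hcorr j ⟨hj0, hj1⟩).mp hb) hnmem
      refine ⟨by omega, ?_, hbf⟩
      exact (hchar j ⟨hj0, hj1⟩).mpr (Or.inr hjR)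
    · rintro ⟨hi, hsf, hbf⟩
      have hviI : pvValid layout.length (i : Int) := ⟨by omega, by omega⟩
      have hnat : (i : Int).toNat = i := by omega
      have hsf' : pvSeenAt seenF (i : Int) = true := by
        unfold pvSeenAt; rw [hnat]; exact hsf
      have hbf' : pvSeenAt base (i : Int) = false := by
        unfold pvSeenAt; rw [hnat]; exact hbf
      have hiR : (i : Int) ∈ R := by
        rcases (hchar _ hviI).mp hsf' with h | h
        · rw [h] at hbf'; exact Bool.noConfusion hbf'
        · exact h
      have hnmem : (i : Int) ∉ seenB := by
        intro hmem
        rw [(hcorr _ hviI).mpr hmem] at hbf'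
        exact Bool.noConfusion hbf'
      refine ⟨(i : Int), ?_, hnat⟩
      rw [hD, List.mem_filter]
      refine ⟨hiR, ?_⟩
      cases hc : PySem.Set.contains seenB (i : Int)
      · rfl
      · exact absurd ((PySem.Set.contains_iff seenB _).mp hc) hnmem
  calc pvNew base seenF
      = (D.map Int.toNat).toFinset.card := by unfold pvNew; rw [hsetEq]
    _ = (D.map Int.toNat).length := List.toFinset_card_of_nodup hDNnd
    _ = D.length := by simp
    _ = (PySem.Set.diff R seenB).length := by rw [hdiff]

-- the two main loops run in lockstep and return the same dictionary
theorem pv_main_eq (layout : List String) (graph : List (List Int))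
    (hg : pvGood layout graph) :
    ∀ (rest : List (Int × String)),
      (∀ p ∈ rest, pvValid layout.length p.1 ∧ p.2 = pvPid layout p.1) →
    ∀ (seenA : List Bool) (seenB : PySem.Set Int) (best : PySem.Dict String Int),
      seenA.length = layout.length →
      seenB.Nodup →
      (∀ j ∈ seenB, pvValid layout.length j) →
      (∀ j, pvValid layout.length j → (pvSeenAt seenA j = true ↔ j ∈ seenB)) →
      pvSeenClosed layout graph seenA →
      pvA_main layout graph rest seenA best = pvB_main layout graph rest seenB best := by
  intro rest
  induction rest with
  | nil =>
    intro _ seenA seenB best _ _ _ _ _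
    rfl
  | cons p rest ih =>
    obtain ⟨idx, pid⟩ := p
    intro hrest seenA seenB best hsl hnd hvB hcorr hcl
    obtain ⟨hvidx', hpidx'⟩ := hrest (idx, pid) (by simp)
    have hvidx : pvValid layout.length idx := hvidx'
    have hpidx : pid = pvPid layout idx := hpidx'
    have hgets : PySem.List.pyGet? seenA idx = some (pvSeenAt seenA idx) :=
      pv_seenAt_get hsl hvidx
    have hrest' : ∀ p ∈ rest, pvValid layout.length p.1 ∧ p.2 = pvPid layout p.1 :=
      fun q hq => hrest q (by simp [hq])
    simp only [pvA_main, pvB_main, hgets]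
    by_cases hpe : pid = ""
    · have hA : (pvSeenAt seenA idx || (pid == "")) = true := by simp [hpe]
      have hB : ((pid == "") || PySem.Set.contains seenB idx) = true := by simp [hpe]
      rw [hA, hB]
      exact ih hrest' seenA seenB best hsl hnd hvB hcorr hcl
    · by_cases hs : pvSeenAt seenA idx = true
      · have hA : (pvSeenAt seenA idx || (pid == "")) = true := by simp [hs]
        have hB : ((pid == "") || PySem.Set.contains seenB idx) = true := by
          have hmem : idx ∈ seenB := (hcorr idx hvidx).mp hs
          rw [(PySem.Set.contains_iff seenB idx).mpr hmem]
          simp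
        rw [hA, hB]
        exact ih hrest' seenA seenB best hsl hnd hvB hcorr hcl
      · -- a fresh cluster is explored by both versions
        have hsF : pvSeenAt seenA idx = false := by
          cases h : pvSeenAt seenA idx
          · rfl
          · exact absurd h hs
        have hnmem : idx ∉ seenB := fun hmem => hs ((hcorr idx hvidx).mpr hmem)
        have hcont : PySem.Set.contains seenB idx = false := by
          cases hc : PySem.Set.contains seenB idx
          · rfl
          · exact absurd ((PySem.Set.contains_iff seenB idx).mp hc) hnmem
        have hA : (pvSeenAt seenA idx || (pid == "")) = false := by simp [hsF, hpe]
        have hB : ((pid == "") || PySem.Set.contains seenB idx) = false := by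
          rw [hcont]
          simp [hpe]
        rw [hA, hB]
        simp only [Bool.false_eq_true, if_false]
        have hpidne : pvPid layout idx ≠ "" := by rw [← hpidx]; exact hpe
        -- B's saturation
        have hadd : PySem.Set.add PySem.Set.empty idx = [idx] := rfl
        obtain ⟨R, hRsat, hRnd, hRsub, hRval, hRcl, hRmin⟩ :=
          pvB_sat_some layout graph pid hg hpe layout.length [idx]
            (by simp)
            (by
              intro j hj
              rcases List.mem_singleton.mp hj with rfl
              exact ⟨hvidx, hpidx.symm⟩)
            (by simp)
        have hidxR : idx ∈ R := hRsub idx (by simp)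
        -- A's flood fill
        have hvl : idx.toNat < seenA.length := by
          obtain ⟨a, b⟩ := hvidx; omega
        have hsetAt : ∀ x : Int,
            pvSeenAt (PySem.List.pySetD seenA idx true) x =
              (if x.toNat = idx.toNat then true else pvSeenAt seenA x) :=
          fun x => pv_seenAt_set hvidx.1 hvl x
        have htoNat : ∀ x : Int, pvValid layout.length x →
            (x.toNat = idx.toNat ↔ x = idx) := by
          intro x hx
          obtain ⟨a, b⟩ := hx
          obtain ⟨c, d⟩ := hvidx
          omega
        have hn1 : 1 ≤ layout.length := by
          obtain ⟨a, b⟩ := hvidx; omega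
        obtain ⟨seenF, sizeF, hloop, f1, f2, f3, f4, f5⟩ :=
          pvA_loop_some layout graph pid hg hpe seenA hsl R
            (fun j hj => hRval j hj)
            hRcl
            (layout.length + 1) [idx] (PySem.List.pySetD seenA idx true) 0
            (by rw [pv_setD_length hvidx.1]; exact hsl)
            (by
              intro j hj hb
              rw [hsetAt j]
              by_cases hjn : j.toNat = idx.toNat
              · simp [hjn]
              · simpa [hjn] using hb)
            (by
              intro j hj hsj
              rw [hsetAt j] at hsj
              by_cases hjn : j.toNat = idx.toNat
              · rw [htoNat j hj] at hjn
                exact Or.inr (hjn ▸ hidxR)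
              · rw [if_neg hjn] at hsj
                exact Or.inl hsj)
            (by
              intro j hj
              rcases List.mem_singleton.mp hj with rfl
              refine ⟨hvidx, hidxR, ?_, hsF⟩
              rw [hsetAt j]
              simp)
            (by simp)
            (by
              intro j hj hsj hbj hjst v hv hvp
              exfalso
              rw [hsetAt j] at hsj
              by_cases hjn : j.toNat = idx.toNat
              · rw [htoNat j hj] at hjn
                exact hjst (by simp [hjn])
              · rw [if_neg hjn] at hsj
                rw [hsj] at hbj
                exact Bool.noConfusion hbj)
            (by
              have hm : pvNew seenA (PySem.List.pySetD seenA idx true) = 1 := by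
                rw [pvNew_mark seenA seenA rfl idx
                  ⟨hvidx.1, by obtain ⟨a, b⟩ := hvidx; omega⟩ hsF hsF, pvNew_self]
              rw [hm]
              simp)
            (by
              have hle : pvNew seenA (PySem.List.pySetD seenA idx true) ≤ seenA.length :=
                pvNew_le _ _
              have hm : pvNew seenA (PySem.List.pySetD seenA idx true) = 1 := by
                rw [pvNew_mark seenA seenA rfl idx
                  ⟨hvidx.1, by obtain ⟨a, b⟩ := hvidx; omega⟩ hsF hsF, pvNew_self]
              simp only [List.length_cons, List.length_nil, hm]
              omega)
        -- the marked set after the phase is exactly seenA ∪ R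
        have hmark : ∀ j, pvValid layout.length j →
            pvSeenAt (PySem.List.pySetD seenA idx true) j = true →
            pvSeenAt seenF j = true := f2
        have hcharF : ∀ j, pvValid layout.length j →
            (pvSeenAt seenF j = true ↔ pvSeenAt seenA j = true ∨ j ∈ R) := by
          intro j hj
          constructor
          · exact f3 j hj
          · rintro (h | h)
            · refine hmark j hj ?_
              rw [hsetAt j]
              by_cases hjn : j.toNat = idx.toNat
              · simp [hjn]
              · simpa [hjn] using h
            · -- minimality of R: the fully-expanded marked set covers R
              refine (hRmin (fun x => pvValid layout.length x ∧ pvPid layout x = pid ∧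
                  pvSeenAt seenF x = true) ?_ ?_ j h).2.2
              · intro x hx
                rcases List.mem_singleton.mp hx with rfl
                refine ⟨hvidx, hpidx.symm, hmark x hvidx ?_⟩
                rw [hsetAt x]
                simp
              · intro u hu v hv hvp
                obtain ⟨huv, hup, hus⟩ := hu
                have hvv : pvValid layout.length v :=
                  (pv_good_row hg huv (hup ▸ hpe)).2 v hv
                refine ⟨hvv, hvp, ?_⟩
                by_cases hsu : pvSeenAt seenA u = true
                · -- u was seen before this phase: its same-id neighbours were too
                  have hlt : u.toNat < seenA.length := by
                    obtain ⟨a, b⟩ := huv; omega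
                  have hcl' := hcl u.toNat hlt hsu
                  have hid : ((u.toNat : Nat) : Int) = u := by
                    obtain ⟨a, b⟩ := huv; omega
                  have hvA : pvSeenAt seenA v = true := by
                    refine hcl'.2 v ?_ ?_
                    · unfold pvRow
                      rw [show ((u.toNat : Nat) : Int).toNat = u.toNat by omega]
                      exact hv
                    · unfold pvPid at hup
                      rw [hvp, hup]
                  refine hmark v hvv ?_
                  rw [hsetAt v]
                  by_cases hjn : v.toNat = idx.toNat
                  · simp [hjn]
                  · simpa [hjn] using hvA
                · -- u is new: the phase expanded it
                  have hbu : pvSeenAt seenA u = false := by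
                    cases hb : pvSeenAt seenA u
                    · rfl
                    · exact absurd hb hsu
                  exact f4 u huv hus hbu v hv hvp
        -- equal sizes
        have hsz : sizeF = ((PySem.Set.diff R seenB).length : Int) := by
          rw [f5]
          exact_mod_cast congrArg (Nat.cast : Nat → Int)
            (pv_count layout seenA hsl seenF R seenB hRnd
              (fun j hj => (hRval j hj).1) hcorr hcharF)
        simp only [hloop, hadd, hRsat]
        rw [hsz]
        -- recurse with the updated states
        refine ih hrest' seenF (PySem.Set.union seenB R) _ f1 ?_ ?_ ?_ ?_
        · exact PySem.Set.nodup_union seenB R hnd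
        · intro j hj
          rcases (PySem.Set.mem_union seenB R j).mp hj with h | h
          · exact hvB j h
          · exact (hRval j h).1
        · intro j hj
          rw [hcharF j hj, hcorr j hj, PySem.Set.mem_union]
        · intro i hi hsi
          have hvi : pvValid layout.length (i : Int) := ⟨by omega, by omega⟩
          have hnat : ((i : Nat) : Int).toNat = i := by omega
          have hsi' : pvSeenAt seenF (i : Int) = true := by
            unfold pvSeenAt; rw [hnat]; exact hsi
          by_cases hold : pvSeenAt seenA (i : Int) = true
          · have hlt : i < seenA.length := by omega
            have hcl' := hcl i hlt (by unfold pvSeenAt at hold; rw [hnat] at hold; exact hold)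
            refine ⟨hcl'.1, ?_⟩
            intro v hv hvp
            have hne : layout.getD i "" ≠ "" := hcl'.1
            have hvv : pvValid layout.length v := by
              refine (pv_good_row hg hvi ?_).2 v ?_
              · unfold pvPid; rw [hnat]; exact hne
              · exact hv
            have hvA := hcl'.2 v hv hvp
            have : pvSeenAt seenF v = true :=
              (hcharF v hvv).mpr (Or.inl hvA)
            unfold pvSeenAt at this ⊢
            exact this
          · have hiR : (i : Int) ∈ R := by
              rcases (hcharF _ hvi).mp hsi' with h | h
              · exact absurd h hold
              · exact h
            have hip : pvPid layout (i : Int) = pid := (hRval _ hiR).2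
            have hone : layout.getD i "" = pid := by
              unfold pvPid at hip; rw [hnat] at hip; exact hip
            refine ⟨by rw [hone]; exact hpe, ?_⟩
            intro v hv hvp
            have hbu : pvSeenAt seenA (i : Int) = false := by
              cases hb : pvSeenAt seenA (i : Int)
              · rfl
              · exact absurd hb hold
            have hvv : pvValid layout.length v :=
              (pv_good_row hg hvi (hip ▸ hpe)).2 v hv
            have := f4 (i : Int) hvi hsi' hbu v hv (by rw [hvp, hone])
            unfold pvSeenAt at this ⊢
            exact this

-- ===== VERDICT (by name: the statement is the Claim_ definition above) =====
theorem largest_cluster_graph_py_spec : Claim_equal_largest_cluster_graph_py := by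
  unfold Claim_equal_largest_cluster_graph_py
  intro layout graph _ hpre
  unfold Spec_largest_cluster_graph_py
  unfold largest_cluster_graph_py largest_cluster_graph_py_alt
  by_cases hl : layout = []
  · simp [hl]
  · by_cases hgr : graph = []
    · simp [hgr]
    · have hle : layout.isEmpty = false := by simp [hl]
      have hge : graph.isEmpty = false := by simp [hgr]
      rw [hle, hge]
      simp only [Bool.false_or, Bool.false_eq_true, if_false]
      have hg : pvGood layout graph := by
        rcases hpre with h | h | h
        · exact absurd h hl
        · exact absurd h hgr
        · exact h
      have hmain := pv_main_eq layout graph hg (PySem.List.enumerate layout)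
        (by
          intro p hp
          rw [PySem.List.mem_enumerate_iff] at hp
          obtain ⟨k, hk, rfl⟩ := hp
          refine ⟨⟨by omega, by simp; omega⟩, ?_⟩
          unfold pvPid
          rw [show ((0 : Int) + (k : Int)).toNat = k by omega]
          simp [List.getD_eq_getElem?_getD, List.getElem?_eq_getElem hk])
        (List.replicate layout.length false) PySem.Set.empty PySem.Dict.empty
        (by simp)
        (by simp [PySem.Set.empty])
        (by simp [PySem.Set.empty])
        (by
          intro j _
          have hz : pvSeenAt (List.replicate layout.length false) j = false := by
            unfold pvSeenAt
            rw [List.getD_eq_getElem?_getD, List.getElem?_replicate]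
            split <;> rfl
          rw [hz]
          simp [PySem.Set.empty])
        (by
          intro i hi h
          have hz : (List.replicate layout.length false).getD i false = false := by
            rw [List.getD_eq_getElem?_getD, List.getElem?_replicate]
            split <;> rfl
          rw [hz] at h
          exact Bool.noConfusion h)
      rw [hmain]
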